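-- pv_equiv track=rewrite | github.com/ptalesara96-afk/100-Days-of-AI-Hustle | project-zero/api/main.py | parse_story_into_pages
-- ===== SOURCE A (Python) =====
-- def parse_story_into_pages(story_text: str) -> tuple[list, str]:
--     pages = []
--     moral = ""
--     current_page = []
--
--     for line in story_text.strip().split('\n'):
--         line = line.strip()
--         if line.startswith('PAGE'):
--             if current_page:
--                 pages.append(' '.join(current_page))
--             current_page = []
--         elif line.startswith('MORAL:'):
--             moral = line.replace('MORAL:', '').strip()
--         elif line:
--             current_page.append(line)
--
--     if current_page:
--         pages.append(' '.join(current_page))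
--
--     return pages, moral
-- ===== SOURCE B (Python) =====
-- def _chunks(lines):
--     # split the line list into chunks separated by PAGE marker lines
--     chunks = [[]]
--     for ln in lines:
--         if ln.startswith('PAGE'):
--             chunks.append([])
--         else:
--             chunks[-1].append(ln)
--     return chunks
--
--
-- def parse_story_into_pages(story_text: str) -> tuple[list, str]:
--     lines = [ln.strip() for ln in story_text.strip().split('\n')]
--     morals = [ln.replace('MORAL:', '').strip() for ln in lines if ln.startswith('MORAL:')]
--     moral = morals[-1] if morals else ""
--     pages = []
--     for chunk in _chunks(lines):
--         content = [ln for ln in chunk if ln and not ln.startswith('MORAL:')]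
--         if content:
--             pages.append(' '.join(content))
--     return pages, moral
-- ===== Notes on version B (the rewrite author's own statement) =====
-- stated objective: alternative
-- what changed: Replaces A's single-pass state machine (mutable current_page/moral accumulators) with a recursive splitter into PAGE-separated chunks, each chunk filtered and joined independently, and the moral computed by a separate filter/map pass taking the last match.
import Mathlib
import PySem

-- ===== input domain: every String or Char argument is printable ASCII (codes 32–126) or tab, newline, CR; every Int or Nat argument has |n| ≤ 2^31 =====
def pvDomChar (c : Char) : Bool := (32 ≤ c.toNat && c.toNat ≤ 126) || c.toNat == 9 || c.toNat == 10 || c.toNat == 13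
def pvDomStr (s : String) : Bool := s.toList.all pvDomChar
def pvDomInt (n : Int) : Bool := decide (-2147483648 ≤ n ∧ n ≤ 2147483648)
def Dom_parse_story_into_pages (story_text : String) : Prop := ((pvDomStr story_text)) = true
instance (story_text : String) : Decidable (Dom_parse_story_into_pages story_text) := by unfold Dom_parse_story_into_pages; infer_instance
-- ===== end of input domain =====

-- B replaces A's one-pass state machine by a different decomposition: a recursive
-- splitter into PAGE-separated chunks (filtered and joined per chunk) and an
-- independent filter/map pass for the moral; objective: alternative decomposition.

-- ===== PORT A =====
-- .split('\n') has the nonempty separator "\n", so split? is always some; getD is never the default.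
def parse_story_into_pages (story_text : String) : List String × String :=
  let st := ((PySem.Str.split? (PySem.Str.strip story_text) "\n").getD []).foldl
    (fun (st : List String × String × List String) raw =>
      let pages := st.1
      let moral := st.2.1
      let cur := st.2.2
      let line := PySem.Str.strip raw
      if PySem.Str.startswith line "PAGE" then
        ((if cur ≠ [] then pages ++ [PySem.Str.join " " cur] else pages), moral, [])
      else if PySem.Str.startswith line "MORAL:" then
        (pages, PySem.Str.strip (PySem.Str.replace line "MORAL:" ""), cur)
      else if line ≠ "" then
        (pages, moral, cur ++ [line])
      else
        (pages, moral, cur))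
    ([], "", [])
  ((if st.2.2 ≠ [] then st.1 ++ [PySem.Str.join " " st.2.2] else st.1), st.2.1)

-- ===== PORT B =====
-- Source B's _chunks; Python's chunks[-1].append(ln) mutation becomes
-- dropLast ++ [last ++ [ln]] (chunks is never empty, so getLastD's default is never used).
def pvChunksB (lines : List String) : List (List String) :=
  lines.foldl
    (fun chunks ln =>
      if PySem.Str.startswith ln "PAGE" then chunks ++ [[]]
      else chunks.dropLast ++ [chunks.getLastD [] ++ [ln]])
    [[]]

def parse_story_into_pages_alt (story_text : String) : List String × String :=
  let lines := ((PySem.Str.split? (PySem.Str.strip story_text) "\n").getD []).map PySem.Str.strip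
  let morals := (lines.filter (fun l => PySem.Str.startswith l "MORAL:")).map
      (fun l => PySem.Str.strip (PySem.Str.replace l "MORAL:" ""))
  let moral := morals.getLast?.getD ""
  let pages := (pvChunksB lines).foldl
    (fun acc c =>
      let content := c.filter (fun l => l ≠ "" && !PySem.Str.startswith l "MORAL:")
      if content ≠ [] then acc ++ [PySem.Str.join " " content] else acc)
    []
  (pages, moral)

-- ===== PRECONDITION & SPEC =====
def Spec_parse_story_into_pages (story_text : String) (out : List String × String) : Prop := out = parse_story_into_pages_alt story_text
instance (story_text : String) (out : List String × String) : Decidable (Spec_parse_story_into_pages story_text out) := by unfold Spec_parse_story_into_pages; infer_instance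

-- ===== CLAIM (what is proved, stated in full; the proofs are below) =====
def Claim_equal_parse_story_into_pages : Prop := ∀ (story_text : String), Dom_parse_story_into_pages story_text → Spec_parse_story_into_pages story_text (parse_story_into_pages story_text)

-- ===== LEMMAS AND PROOFS =====

-- abbreviations used only by the proofs
def pvQ (l : String) : Bool := l ≠ "" && !PySem.Str.startswith l "MORAL:"
def pvF (l : String) : String := PySem.Str.strip (PySem.Str.replace l "MORAL:" "")
def pvJ (c : List String) : String := PySem.Str.join " " c

-- the chunk list, as a structural recursion (proof-side characterization of pvChunksB)
def pvChunks : List String → List (List String)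
  | [] => [[]]
  | h :: rest =>
    if PySem.Str.startswith h "PAGE" then [] :: pvChunks rest
    else (h :: (pvChunks rest).headD []) :: (pvChunks rest).drop 1

def pvConsFirst (c : List String) : List (List String) → List (List String)
  | [] => [c]
  | d :: ds => (c ++ d) :: ds

-- A's page list, as a recursion over the stripped lines
def pvPg (cur : List String) : List String → List String
  | [] => if cur ≠ [] then [pvJ cur] else []
  | l :: ls =>
    if PySem.Str.startswith l "PAGE" then
      (if cur ≠ [] then [pvJ cur] else []) ++ pvPg [] ls
    else if PySem.Str.startswith l "MORAL:" then pvPg cur ls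
    else if l ≠ "" then pvPg (cur ++ [l]) ls
    else pvPg cur ls

-- A's moral, as a recursion over the stripped lines
def pvM (m : String) : List String → String
  | [] => m
  | l :: ls => pvM (if PySem.Str.startswith l "MORAL:" then pvF l else m) ls

def pvStepA (st : List String × String × List String) (line : String) :
    List String × String × List String :=
  if PySem.Str.startswith line "PAGE" then
    ((if st.2.2 ≠ [] then st.1 ++ [pvJ st.2.2] else st.1), st.2.1, [])
  else if PySem.Str.startswith line "MORAL:" then
    (st.1, pvF line, st.2.2)
  else if line ≠ "" then (st.1, st.2.1, st.2.2 ++ [line])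
  else st

def pvStepB (acc : List String) (c : List String) : List String :=
  if c.filter pvQ ≠ [] then acc ++ [pvJ (c.filter pvQ)] else acc

lemma pv_not_both (l : String) (h : PySem.Str.startswith l "PAGE" = true) :
    PySem.Str.startswith l "MORAL:" = false := by
  by_contra hm
  rw [Bool.not_eq_false] at hm
  rw [PySem.Str.startswith_eq, PySem.Chars.startswith_iff] at h hm
  obtain ⟨t1, h1⟩ := h
  obtain ⟨t2, h2⟩ := hm
  rw [← h2, show ("PAGE".toList) = ['P', 'A', 'G', 'E'] from by decide,
    show ("MORAL:".toList) = ['M', 'O', 'R', 'A', 'L', ':'] from by decide] at h1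
  simp at h1

lemma pv_getLastD_cons (xs : List String) :
    ∀ (x m : String), ((x :: xs).getLast?.getD m) = (xs.getLast?.getD x) := by
  induction xs with
  | nil => intro x m; simp
  | cons y ys ih =>
    intro x m
    rw [List.getLast?_cons_cons, ih y m, ih y x]

lemma pvM_eq (ls : List String) (m : String) :
    pvM m ls =
      ((ls.filter (fun l => PySem.Str.startswith l "MORAL:")).map pvF).getLast?.getD m := by
  induction ls generalizing m with
  | nil => simp [pvM]
  | cons l ls ih =>
    rw [pvM, List.filter_cons]
    cases hm : PySem.Str.startswith l "MORAL:"
    · simp [ih]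
    · simp only [if_true, List.map_cons, ih, pv_getLastD_cons]

-- A's fold, finished by the trailing flush, equals (pages ++ pvPg cur ls, pvM m ls)
lemma pv_A_char (ls : List String) :
    ∀ (pages : List String) (m : String) (cur : List String),
    ((if (ls.foldl pvStepA (pages, m, cur)).2.2 ≠ [] then
        (ls.foldl pvStepA (pages, m, cur)).1 ++ [pvJ (ls.foldl pvStepA (pages, m, cur)).2.2]
      else (ls.foldl pvStepA (pages, m, cur)).1),
     (ls.foldl pvStepA (pages, m, cur)).2.1) =
    (pages ++ pvPg cur ls, pvM m ls) := by
  induction ls with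
  | nil =>
    intro pages m cur
    simp only [List.foldl_nil, pvPg, pvM]
    by_cases hc : cur = [] <;> simp [hc]
  | cons l ls ih =>
    intro pages m cur
    simp only [List.foldl_cons]
    cases hp : PySem.Str.startswith l "PAGE"
    · cases hm : PySem.Str.startswith l "MORAL:"
      · by_cases he : l = ""
        · have hp0 : PySem.Chars.startswith ([] : List Char) ['P', 'A', 'G', 'E'] = false := by decide
          have hm0 : PySem.Chars.startswith ([] : List Char) ['M', 'O', 'R', 'A', 'L', ':'] = false := by decide
          simp only [pvStepA, he, ne_eq, not_true_eq_false, if_false, ih, pvPg, pvM]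
          simp [hp0, hm0]
        · simp only [pvStepA, hp, hm, Bool.false_eq_true, if_false, ne_eq, he,
            not_false_eq_true, if_true, ih, pvPg, pvM]
      · simp only [pvStepA, hp, Bool.false_eq_true, if_false, hm, if_true, ih, pvPg, pvM]
    · have hm := pv_not_both l hp
      simp only [pvStepA, hp, if_true, ih, pvPg, pvM, hm, Bool.false_eq_true, if_false]
      by_cases hc : cur = [] <;> simp [hc]
  
lemma pvChunks_ne_nil (ls : List String) : pvChunks ls ≠ [] := by
  cases ls with
  | nil => simp [pvChunks]
  | cons h t => simp only [pvChunks]; split <;> simp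

lemma pv_foldB_append (cs : List (List String)) (a : List String) :
    cs.foldl pvStepB a = a ++ cs.foldl pvStepB [] := by
  induction cs generalizing a with
  | nil => simp
  | cons c cs ih =>
    simp only [List.foldl_cons]
    rw [ih, ih (pvStepB [] c)]
    simp only [pvStepB, List.nil_append]
    split <;> simp

lemma pv_chunks_aux (ls : List String) :
    ∀ (i0 : List (List String)) (a : List String),
    List.foldl
      (fun chunks ln =>
        if PySem.Str.startswith ln "PAGE" then chunks ++ [[]]
        else chunks.dropLast ++ [chunks.getLastD [] ++ [ln]])
      (i0 ++ [a]) ls =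
    i0 ++ pvConsFirst a (pvChunks ls) := by
  induction ls with
  | nil => intro i0 a; simp [pvChunks, pvConsFirst]
  | cons l ls ih =>
    intro i0 a
    simp only [List.foldl_cons]
    obtain ⟨c, cs, hc⟩ := List.exists_cons_of_ne_nil (pvChunks_ne_nil ls)
    cases hp : PySem.Str.startswith l "PAGE"
    · simp only [Bool.false_eq_true, if_false, List.dropLast_concat, List.getLastD_concat]
      rw [ih i0 (a ++ [l])]
      simp only [pvChunks, hp, Bool.false_eq_true, if_false, hc, List.headD_cons,
        List.drop_one, List.tail_cons, pvConsFirst]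
      simp
    · simp only [if_true, List.append_assoc]
      rw [show (i0 ++ ([a] ++ [[]])) = (i0 ++ [a]) ++ [([] : List String)] from by simp,
        ih (i0 ++ [a]) []]
      simp only [pvChunks, hp, if_true, hc, pvConsFirst]
      simp

lemma pvChunksB_eq (ls : List String) : pvChunksB ls = pvChunks ls := by
  have h := pv_chunks_aux ls [] []
  simp only [List.nil_append] at h
  rw [pvChunksB, h]
  obtain ⟨c, cs, hc⟩ := List.exists_cons_of_ne_nil (pvChunks_ne_nil ls)
  rw [hc]
  simp [pvConsFirst]

-- B's chunk fold equals pvPg, provided cur is already filtered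
lemma pv_B_char (ls : List String) :
    ∀ (cur : List String), cur.filter pvQ = cur →
    pvPg cur ls =
      pvStepB [] (cur ++ ((pvChunks ls).headD []).filter pvQ) ++
        ((pvChunks ls).drop 1).foldl pvStepB [] := by
  induction ls with
  | nil =>
    intro cur hcur
    simp only [pvChunks, List.headD_cons, List.filter_nil, List.append_nil, List.drop_one,
      List.tail_cons, List.foldl_nil, List.append_nil, pvStepB, hcur, pvPg]
    by_cases hc : cur = [] <;> simp [hc]
  | cons l ls ih =>
    intro cur hcur
    cases hp : PySem.Str.startswith l "PAGE"
    · have hchunk : pvChunks (l :: ls) =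
          (l :: (pvChunks ls).headD []) :: (pvChunks ls).drop 1 := by
        simp only [pvChunks, hp]; simp
      cases hq : pvQ l
      · -- l empty or MORAL: skipped by A, filtered out by B
        have hskip : pvPg cur (l :: ls) = pvPg cur ls := by
          simp only [pvPg, hp, Bool.false_eq_true, if_false]
          by_cases hm : PySem.Str.startswith l "MORAL:" = true
          · simp at hm
            simp [hm]
          · rw [Bool.not_eq_true] at hm
            simp at hm
            have he : l = "" := by
              by_contra he
              simp [pvQ, he, hm] at hq
            simp [he]
        rw [hskip, ih cur hcur, hchunk]
        simp only [List.headD_cons, List.drop_one, List.tail_cons, List.filter_cons, hq,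
          Bool.false_eq_true, if_false]
      · have hm : PySem.Str.startswith l "MORAL:" = false := by
          simp only [pvQ, Bool.and_eq_true, Bool.not_eq_true'] at hq; exact hq.2
        have he : l ≠ "" := by
          simp only [pvQ, Bool.and_eq_true, decide_eq_true_eq] at hq; exact hq.1
        simp only [pvPg, hp, Bool.false_eq_true, if_false, hm, ne_eq, he,
          not_false_eq_true, if_true]
        rw [ih (cur ++ [l]) (by simp [List.filter_append, hcur, hq])]
        rw [hchunk]
        simp [hq]
    · simp only [pvPg, pvChunks, hp, if_true]
      rw [ih [] (by simp)]
      obtain ⟨c, cs, hc⟩ := List.exists_cons_of_ne_nil (pvChunks_ne_nil ls)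
      simp only [hc, List.headD_cons, List.drop_one, List.tail_cons, List.foldl_cons,
        List.nil_append, List.filter_nil, List.append_nil]
      rw [pv_foldB_append cs (pvStepB [] c)]
      have hstep : pvStepB [] (c.filter pvQ) = pvStepB [] c := by
        simp [pvStepB, List.filter_filter]
      have hcurstep : pvStepB [] cur = (if cur ≠ [] then [pvJ cur] else []) := by
        simp only [pvStepB, hcur, List.nil_append]
      rw [hstep, hcurstep]

-- the two unfolded bodies agree, for any line list
lemma pv_main (raws : List String) :
    ((if (raws.foldl (fun st raw => pvStepA st (PySem.Str.strip raw)) ([], "", [])).2.2 ≠ [] then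
        (raws.foldl (fun st raw => pvStepA st (PySem.Str.strip raw)) ([], "", [])).1 ++
          [pvJ (raws.foldl (fun st raw => pvStepA st (PySem.Str.strip raw)) ([], "", [])).2.2]
      else (raws.foldl (fun st raw => pvStepA st (PySem.Str.strip raw)) ([], "", [])).1),
     (raws.foldl (fun st raw => pvStepA st (PySem.Str.strip raw)) ([], "", [])).2.1) =
    ((pvChunksB (raws.map PySem.Str.strip)).foldl pvStepB [],
     (((raws.map PySem.Str.strip).filter (fun l => PySem.Str.startswith l "MORAL:")).map
        pvF).getLast?.getD "") := by
  rw [pvChunksB_eq, ← List.foldl_map (f := PySem.Str.strip) (g := pvStepA), pv_A_char,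
      pv_B_char _ [] (by simp)]
  obtain ⟨c, cs, hc⟩ := List.exists_cons_of_ne_nil (pvChunks_ne_nil (raws.map PySem.Str.strip))
  rw [hc]
  simp only [List.headD_cons, List.drop_one, List.tail_cons, List.nil_append, List.foldl_cons,
    Prod.mk.injEq]
  refine ⟨?_, ?_⟩
  · rw [pv_foldB_append cs (pvStepB [] c)]
    have hstep : pvStepB [] (c.filter pvQ) = pvStepB [] c := by
      simp [pvStepB, List.filter_filter]
    rw [hstep]
  · rw [pvM_eq]

-- ===== VERDICT (by name: the statement is the Claim_ definition above) =====
set_option maxHeartbeats 1000000 in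
theorem parse_story_into_pages_spec : Claim_equal_parse_story_into_pages := by
  intro s _hDom
  show parse_story_into_pages s = parse_story_into_pages_alt s
  unfold parse_story_into_pages parse_story_into_pages_alt
  generalize (PySem.Str.split? (PySem.Str.strip s) "\n").getD [] = raws
  exact pv_main raws
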